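-- pv_equiv track=rewrite | github.com/arguhuh/AoC | 2021/code18.py | find_nested
-- ===== SOURCE A (Python) =====
-- def find_nested(N):
-- 	layer = 0
-- 	p = 0
-- 	for c in N:
-- 		if c == '[':
-- 			layer += 1
-- 		elif c == ']':
-- 			layer -= 1
-- 		if layer == 5:
-- 			return p
-- 		p += 1
-- ===== SOURCE B (Python) =====
-- def _summ(s):
--     # Divide and conquer. Summary of a segment s: (delta, hits) where delta is the
--     # total bracket balance of s and hits[t-1] is the first index in s at which the
--     # running balance reaches level t (levels reached are exactly 1..len(hits),
--     # because the balance moves in steps of at most 1, and their first-hit indices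
--     # are increasing).
--     n = len(s)
--     if n == 0:
--         return (0, [])
--     if n == 1:
--         c = s[0]
--         if c == '[':
--             return (1, [0])
--         if c == ']':
--             return (-1, [])
--         return (0, [])
--     mid = n // 2
--     dl, hl = _summ(s[:mid])
--     dr, hr = _summ(s[mid:])
--     # levels 1..len(hl) are first reached inside the left half; a higher level
--     # t is first reached in the right half at relative level t - dl, i.e. at the
--     # entries of hr from position len(hl) - dl on (an index that is never negative,
--     # since dl <= len(hl)).
--     return (dl + dr, hl + [i + mid for i in hr[len(hl) - dl:]])
--
-- def find_nested(N):
--     h = _summ(N)[1]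
--     return h[4] if len(h) > 4 else None
-- ===== Notes on version B (the rewrite author's own statement) =====
-- stated objective: alternative
-- what changed: B replaces A's single left-to-right depth scan with early return by a divide-and-conquer: each half of the string is recursively summarized as (bracket balance, list of first indices at which each positive nesting level is first reached) and the two summaries are merged; the answer is the level-5 entry of the whole string's summary.
import Mathlib
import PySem

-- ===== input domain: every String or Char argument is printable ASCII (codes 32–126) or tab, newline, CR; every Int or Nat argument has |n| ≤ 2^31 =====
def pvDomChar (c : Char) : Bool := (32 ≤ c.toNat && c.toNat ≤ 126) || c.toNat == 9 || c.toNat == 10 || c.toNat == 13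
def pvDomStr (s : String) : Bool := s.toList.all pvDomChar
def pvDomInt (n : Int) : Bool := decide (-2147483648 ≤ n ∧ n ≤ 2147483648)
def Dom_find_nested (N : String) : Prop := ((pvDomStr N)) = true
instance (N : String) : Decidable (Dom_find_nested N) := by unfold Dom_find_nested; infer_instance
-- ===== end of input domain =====

-- B replaces A's single left-to-right depth scan by a divide-and-conquer that summarizes each
-- half as (bracket balance, first-hit index of each positive level) and merges the summaries;
-- objective: alternative (not faster).

-- ===== PORT A =====
-- A's loop: state (layer, p), branch chain on the char, early return when layer == 5.
def findNestedGo : List Char → Int → Int → Option Int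
  | [], _, _ => none
  | c :: rest, layer, p =>
    let layer' := if c = '[' then layer + 1 else if c = ']' then layer - 1 else layer
    if layer' = 5 then some p else findNestedGo rest layer' (p + 1)

def find_nested (N : String) : Option Int := findNestedGo N.toList 0 0

-- ===== PORT B =====
-- Source B's _summ: divide-and-conquer summary (delta, hits) of a segment.
-- s[:mid] / s[mid:] are ported as take/drop (= PySem.List.slice_to_natCast /
-- slice_from_natCast, exact for these nonnegative in-range bounds); hr[len(hl)-dl:]
-- keeps its Int bound through PySem.List.slice.
def pvSumm : List Char → Int × List Int
  | [] => (0, [])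
  | [c] => if c = '[' then (1, [0]) else if c = ']' then (-1, []) else (0, [])
  | a :: b :: t =>
    let mid := (a :: b :: t).length / 2
    let l := pvSumm ((a :: b :: t).take mid)
    let r := pvSumm ((a :: b :: t).drop mid)
    (l.1 + r.1,
      l.2 ++ (PySem.List.slice r.2 (some ((l.2.length : Int) - l.1)) none).map
        (fun i => i + (mid : Int)))
termination_by s => s.length
decreasing_by
  · simp [List.length_take]; omega
  · simp [List.length_drop]; omega

-- Source B's find_nested: h[4] if len(h) > 4 else None
def find_nested_alt (N : String) : Option Int :=
  let h := (pvSumm N.toList).2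
  if 4 < h.length then PySem.List.pyGet? h 4 else none

-- ===== PRECONDITION & SPEC =====
def Spec_find_nested (N : String) (out : Option Int) : Prop := out = find_nested_alt N
instance (N : String) (out : Option Int) : Decidable (Spec_find_nested N out) := by unfold Spec_find_nested; infer_instance

-- ===== CLAIM (what is proved, stated in full; the proofs are below) =====
def Claim_equal_find_nested : Prop := ∀ (N : String), Dom_find_nested N → Spec_find_nested N (find_nested N)

-- ===== LEMMAS AND PROOFS =====

-- total bracket balance of a segment
def pvDelta : List Char → Int
  | [] => 0
  | c :: cs => (if c = '[' then 1 else if c = ']' then (-1 : Int) else 0) + pvDelta cs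

-- first-hit table: (pvH s)[t-1] is the first index of s at which the running balance reaches t
def pvH : List Char → List Int
  | [] => []
  | c :: cs =>
    if c = '[' then 0 :: (pvH cs).map (· + 1)
    else if c = ']' then ((pvH cs).map (· + 1)).drop 1
    else (pvH cs).map (· + 1)

lemma pvDelta_le_lenH (s : List Char) : pvDelta s ≤ ((pvH s).length : Int) := by
  induction s with
  | nil => simp [pvDelta, pvH]
  | cons c cs ih =>
    simp only [pvDelta, pvH]
    split_ifs <;> simp <;> omega

lemma pvDelta_append (l r : List Char) : pvDelta (l ++ r) = pvDelta l + pvDelta r := by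
  induction l with
  | nil => simp [pvDelta]
  | cons c cs ih => simp [pvDelta, ih]; ring

-- merge law of the first-hit table: levels beyond those reached in l are first reached in r
lemma pvH_append (l r : List Char) :
    pvH (l ++ r) = pvH l ++
      ((pvH r).drop (((pvH l).length : Int) - pvDelta l).toNat).map
        (fun i => i + (l.length : Int)) := by
  induction l with
  | nil => simp [pvH, pvDelta]
  | cons c cs ih =>
    have hle := pvDelta_le_lenH cs
    have hf : ((fun x : Int => x + 1) ∘ fun i : Int => i + (cs.length : Int))
        = fun i : Int => i + ((c :: cs).length : Int) := by
      funext i; simp; ring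
    simp only [List.cons_append, pvH, pvDelta, ih]
    split_ifs with h1 h2
    · -- '['
      rw [List.map_append, List.map_map, hf]
      have hK : (((0 :: (pvH cs).map (· + 1)).length : Int) - (1 + pvDelta cs)).toNat
          = (((pvH cs).length : Int) - pvDelta cs).toNat := by simp; omega
      rw [hK]; simp
    · -- ']'
      rcases hH : pvH cs with _ | ⟨x, xs⟩
      · rw [hH] at ih hle
        simp only [hH, List.length_nil, List.nil_append] at *
        rw [List.map_map, hf, List.map_drop, List.drop_drop, List.map_nil,
          List.drop_nil, List.nil_append, ← List.map_drop]
        congr 2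
        simp at hle ⊢; omega
      · rw [hH] at ih hle
        simp only [hH, List.length_cons] at *
        rw [List.map_append, List.map_map, hf, List.map_cons, List.cons_append,
          List.drop_one, List.tail_cons]
        simp only [List.drop_one, List.tail_cons, List.length_map]
        congr 3
        omega
    · -- other
      rw [List.map_append, List.map_map, hf]
      have hK : ((((pvH cs).map (· + 1)).length : Int) - (0 + pvDelta cs)).toNat
          = (((pvH cs).length : Int) - pvDelta cs).toNat := by simp
      rw [hK]

-- xs[k:] for a provably nonnegative Int bound
lemma pvSliceFrom (xs : List Int) (k : Int) (hk : 0 ≤ k) :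
    PySem.List.slice xs (some k) none = xs.drop k.toNat := by
  have h : k = ((k.toNat : Nat) : Int) := by omega
  rw [h, PySem.List.slice_from_natCast]
  simp
  omega

-- B's divide and conquer computes exactly (balance, first-hit table)
lemma pvSumm_eq (s : List Char) : pvSumm s = (pvDelta s, pvH s) := by
  induction s using pvSumm.induct with
  | case1 => simp [pvSumm, pvDelta, pvH]
  | case2 => simp [pvSumm, pvDelta, pvH]
  | case3 h => simp [pvSumm, pvDelta, pvH]
  | case4 c h1 h2 => simp [pvSumm, pvDelta, pvH, h1, h2]
  | case5 a b t mid ih1 ih2 =>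
    have hsplit := List.take_append_drop ((a :: b :: t).length / 2) (a :: b :: t)
    have hle := pvDelta_le_lenH ((a :: b :: t).take ((a :: b :: t).length / 2))
    have hmid : ((a :: b :: t).take ((a :: b :: t).length / 2)).length
        = (a :: b :: t).length / 2 := by simp [List.length_take]; omega
    have hm : mid = (a :: b :: t).length / 2 := rfl
    rw [hm] at ih1 ih2
    simp only [pvSumm, ih1, ih2]
    rw [pvSliceFrom _ _ (by omega)]
    conv_rhs => rw [← hsplit]
    rw [pvDelta_append, pvH_append, hmid]

-- A's scan looks up level 5 - layer in the first-hit table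
lemma findNestedGo_eq (cs : List Char) : ∀ (k : Nat) (p : Int),
    findNestedGo cs (4 - (k : Int)) p = ((pvH cs)[k]?).map (fun i => p + i) := by
  induction cs with
  | nil => intro k p; simp [findNestedGo, pvH]
  | cons c cs ih =>
    intro k p
    simp only [findNestedGo, pvH]
    by_cases h1 : c = '['
    · simp only [if_pos h1]
      cases k with
      | zero => norm_num
      | succ k' =>
        have harith : (4:Int) - ((k' + 1 : Nat) : Int) + 1 = 4 - (k' : Int) := by
          push_cast; ring
        rw [harith, if_neg (show ¬((4:Int) - (k' : Int) = 5) by omega), ih k' (p + 1)]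
        rw [List.getElem?_cons_succ, List.getElem?_map]
        cases (pvH cs)[k']? with
        | none => simp
        | some i => simp; ring
    · by_cases h2 : c = ']'
      · simp only [if_neg h1, if_pos h2]
        have harith : (4:Int) - (k : Int) - 1 = 4 - ((k + 1 : Nat) : Int) := by
          push_cast; ring
        rw [if_neg (show ¬((4:Int) - (k : Int) - 1 = 5) by omega), harith, ih (k + 1) (p + 1)]
        rw [List.getElem?_drop, List.getElem?_map]
        have h1k : 1 + k = k + 1 := by omega
        rw [h1k]
        cases (pvH cs)[k + 1]? with
        | none => simp
        | some i => simp; ring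
      · simp only [if_neg h1, if_neg h2]
        rw [if_neg (show ¬((4:Int) - (k : Int) = 5) by omega), ih k (p + 1), List.getElem?_map]
        cases (pvH cs)[k]? with
        | none => simp
        | some i => simp; ring

-- ===== VERDICT (by name: the statement is the Claim_ definition above) =====
theorem find_nested_spec : Claim_equal_find_nested := by
  intro N _
  unfold Spec_find_nested find_nested find_nested_alt
  rw [pvSumm_eq]
  have h := findNestedGo_eq N.toList 4 0
  norm_num at h
  rw [h]
  by_cases h4 : 4 < (pvH N.toList).length
  · simp [h4]
  · simp [h4]
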